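-- pv_equiv track=rewrite | github.com/pypi-data/pypi-mirror-400 | packages/mostlyai-engine/mostlyai_engine-2.4.0-py3-none-any.whl/mostlyai/engine/_common.py | get_argn_name
-- ===== SOURCE A (Python) =====
-- PREFIX_TABLE = ":"
--
-- PREFIX_COLUMN = "/"
--
-- PREFIX_SUB_COLUMN = "__"
--
-- def get_argn_name(
--     argn_processor: str,
--     argn_table: str | None = None,
--     argn_column: str | None = None,
--     argn_sub_column: str | None = None,
-- ) -> str:
--     name = [
--         argn_processor,
--         PREFIX_TABLE if any(c is not None for c in [argn_table, argn_column, argn_sub_column]) else "",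
--         argn_table if argn_table is not None else "",
--         PREFIX_COLUMN if any(c is not None for c in [argn_column, argn_sub_column]) else "",
--         argn_column if argn_column is not None else "",
--         PREFIX_SUB_COLUMN if argn_sub_column is not None else "",
--         argn_sub_column if argn_sub_column is not None else "",
--     ]
--     return "".join(name)
-- ===== SOURCE B (Python) =====
-- PREFIX_TABLE = ":"
--
-- PREFIX_COLUMN = "/"
--
-- PREFIX_SUB_COLUMN = "__"
--
--
-- def get_argn_name(
--     argn_processor: str,
--     argn_table: str | None = None,
--     argn_column: str | None = None,
--     argn_sub_column: str | None = None,
-- ) -> str: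
--     levels = [
--         (argn_table, PREFIX_TABLE),
--         (argn_column, PREFIX_COLUMN),
--         (argn_sub_column, PREFIX_SUB_COLUMN),
--     ]
--     last = -1
--     for i, (value, _) in enumerate(levels):
--         if value is not None:
--             last = i
--     name = argn_processor
--     for i, (value, prefix) in enumerate(levels):
--         if i <= last:
--             name += prefix
--         if value is not None:
--             name += value
--     return name
-- ===== Notes on version B (the rewrite author's own statement) =====
-- stated objective: simpler
-- what changed: Replaces the flat 7-element list with repeated any() rescans of the deeper fields by a single levels list: the deepest present index is computed once, then one pass appends each prefix (when at or before that index) and each present value.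
import Mathlib
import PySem

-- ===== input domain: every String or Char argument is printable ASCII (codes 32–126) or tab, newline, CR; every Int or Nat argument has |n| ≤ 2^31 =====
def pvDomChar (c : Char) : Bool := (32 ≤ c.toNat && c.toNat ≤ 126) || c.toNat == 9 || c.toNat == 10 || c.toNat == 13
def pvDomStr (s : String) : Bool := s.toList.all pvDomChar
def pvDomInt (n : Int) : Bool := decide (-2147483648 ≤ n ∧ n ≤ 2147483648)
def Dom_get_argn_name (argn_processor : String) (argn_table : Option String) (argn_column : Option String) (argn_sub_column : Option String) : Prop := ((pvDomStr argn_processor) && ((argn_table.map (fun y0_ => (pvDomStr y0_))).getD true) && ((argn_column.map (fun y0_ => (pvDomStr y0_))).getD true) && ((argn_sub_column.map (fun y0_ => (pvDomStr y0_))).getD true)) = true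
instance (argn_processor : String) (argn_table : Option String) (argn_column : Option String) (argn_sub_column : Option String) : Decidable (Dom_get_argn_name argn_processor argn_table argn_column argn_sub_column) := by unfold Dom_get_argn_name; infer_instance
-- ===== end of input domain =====

-- B computes the deepest present level once and appends prefixes/values in a single pass,
-- replacing A's flat 7-element list with repeated any() rescans; objective: simpler decomposition.

-- ===== PORT A =====
def get_argn_name (argn_processor : String) (argn_table : Option String) (argn_column : Option String) (argn_sub_column : Option String) : String :=
  let name : List String :=
    [ argn_processor,
      if argn_table.isSome || argn_column.isSome || argn_sub_column.isSome then ":" else "",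
      match argn_table with | some v => v | none => "",
      if argn_column.isSome || argn_sub_column.isSome then "/" else "",
      match argn_column with | some v => v | none => "",
      if argn_sub_column.isSome then "__" else "",
      match argn_sub_column with | some v => v | none => "" ]
  PySem.Str.join "" name

-- ===== PORT B =====
def get_argn_name_alt (argn_processor : String) (argn_table : Option String) (argn_column : Option String) (argn_sub_column : Option String) : String :=
  let levels : List (Option String × String) :=
    [(argn_table, ":"), (argn_column, "/"), (argn_sub_column, "__")]
  let last : Int :=
    (PySem.List.enumerate levels).foldl
      (fun acc iv => if iv.2.1.isSome then iv.1 else acc) (-1)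
  (PySem.List.enumerate levels).foldl
    (fun name iv =>
      let name := if iv.1 ≤ last then name ++ iv.2.2 else name
      match iv.2.1 with | some v => name ++ v | none => name)
    argn_processor

-- ===== PRECONDITION & SPEC =====
def Spec_get_argn_name (argn_processor : String) (argn_table : Option String) (argn_column : Option String) (argn_sub_column : Option String) (out : String) : Prop := out = get_argn_name_alt argn_processor argn_table argn_column argn_sub_column
instance (argn_processor : String) (argn_table : Option String) (argn_column : Option String) (argn_sub_column : Option String) (out : String) : Decidable (Spec_get_argn_name argn_processor argn_table argn_column argn_sub_column out) := by unfold Spec_get_argn_name; infer_instance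

-- ===== CLAIM (what is proved, stated in full; the proofs are below) =====
def Claim_equal_get_argn_name : Prop := ∀ (argn_processor : String) (argn_table : Option String) (argn_column : Option String) (argn_sub_column : Option String), Dom_get_argn_name argn_processor argn_table argn_column argn_sub_column → Spec_get_argn_name argn_processor argn_table argn_column argn_sub_column (get_argn_name argn_processor argn_table argn_column argn_sub_column)

-- ===== LEMMAS AND PROOFS =====

-- ===== VERDICT (by name: the statement is the Claim_ definition above) =====
theorem get_argn_name_spec : Claim_equal_get_argn_name := by
  intro p t c s _
  unfold Spec_get_argn_name get_argn_name get_argn_name_alt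
  rcases t with _ | tv <;> rcases c with _ | cv <;> rcases s with _ | sv <;>
    (rw [← String.toList_inj]; simp [PySem.Chars.join, List.intercalate])
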